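-- pv_equiv track=rewrite | github.com/PeachyCodes/Fundamentos | Trabajo Práctico 6/tp6_13.py | ultimosdigitos
-- ===== SOURCE A (Python) =====
-- def ultimosdigitos(a,b):
--     ultimo=0
--     const=a
--     multi=10
--     if a>(10**(b)):
--         for i in range (0,b):
--             restando=(a//10)*multi
--             ultimo=const-restando
--             a=a//10
--             multi=multi*10
--         return ultimo
--     else:
--         return const
-- ===== SOURCE B (Python) =====
-- def ultimosdigitos(a, b):
--     if a <= 10**b:
--         return a
--     def tail(a, b):
--         if b <= 0:
--             return 0
--         return tail(a // 10, b - 1) * 10 + a % 10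
--     return tail(a, b)
-- ===== Notes on version B (the rewrite author's own statement) =====
-- stated objective: simpler
-- what changed: B replaces A's imperative loop with four mutable variables and a subtraction trick by a short recursion on b: tail(a,b) = tail(a//10, b-1)*10 + a%10, building the remainder from the low digit up with no loop state at all.
import Mathlib
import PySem

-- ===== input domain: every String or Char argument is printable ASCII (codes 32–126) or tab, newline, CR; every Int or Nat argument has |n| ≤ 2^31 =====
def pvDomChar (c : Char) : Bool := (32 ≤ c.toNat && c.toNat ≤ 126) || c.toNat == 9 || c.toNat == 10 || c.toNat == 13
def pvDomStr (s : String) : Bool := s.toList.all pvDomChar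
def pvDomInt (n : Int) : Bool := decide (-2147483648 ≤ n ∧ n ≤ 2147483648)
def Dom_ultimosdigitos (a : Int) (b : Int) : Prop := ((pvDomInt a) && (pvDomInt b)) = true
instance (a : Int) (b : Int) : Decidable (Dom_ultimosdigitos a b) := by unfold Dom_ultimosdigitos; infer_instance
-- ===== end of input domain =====

-- B replaces A's four-variable loop and subtraction trick with a short recursion on b
-- (tail(a,b) = tail(a//10,b-1)*10 + a%10); same cost, no loop state (objective: simpler).

-- Python's 'a > 10**b' / 'a <= 10**b'. For b < 0, Python's 10**b is a float in (0, 0.1]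
-- (underflowing to 0.0 for very negative b); since a is an integer, 'a > 10**b' is then
-- exactly '1 ≤ a'. This helper is exact on all Int inputs.
def gtPow10 (a b : Int) : Bool :=
  if 0 ≤ b then decide (a > 10 ^ b.toNat) else decide (1 ≤ a)

-- ===== PORT A =====
def ultimosdigitos (a : Int) (b : Int) : Int :=
  let ultimo : Int := 0
  let const : Int := a
  let multi : Int := 10
  if gtPow10 a b then
    -- for i in range(0, b): restando = (a//10)*multi; ultimo = const - restando; a //= 10; multi *= 10
    ((PySem.List.pyRange 0 b 1).foldl
      (fun (st : Int × Int × Int) _ =>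
        let restando := (PySem.Int.floordiv st.2.1 10) * st.2.2
        (const - restando, PySem.Int.floordiv st.2.1 10, st.2.2 * 10))
      (ultimo, a, multi)).1
  else const

-- ===== PORT B =====
-- tail's recursion is on b, which only decreases while b > 0: b.toNat is the fuel,
-- and 'b ≤ 0' in Python is exactly 'b.toNat = 0' here.
def tailDigits (a : Int) : Nat → Int
  | 0 => 0
  | n + 1 => tailDigits (PySem.Int.floordiv a 10) n * 10 + PySem.Int.mod a 10

def ultimosdigitos_alt (a : Int) (b : Int) : Int :=
  if ¬ gtPow10 a b then a        -- if a <= 10**b: return a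
  else tailDigits a b.toNat      -- return tail(a, b)

-- ===== PRECONDITION & SPEC =====
def Spec_ultimosdigitos (a : Int) (b : Int) (out : Int) : Prop := out = ultimosdigitos_alt a b
instance (a : Int) (b : Int) (out : Int) : Decidable (Spec_ultimosdigitos a b out) := by unfold Spec_ultimosdigitos; infer_instance

-- ===== CLAIM =====
def Claim_equal_ultimosdigitos : Prop := ∀ (a : Int) (b : Int), Dom_ultimosdigitos a b → Spec_ultimosdigitos a b (ultimosdigitos a b)

-- ===== LEMMAS AND PROOFS =====

-- a fold whose step ignores the element is an iterate of the step
theorem foldl_ignore {α σ : Type} (f : σ → α → σ) (g : σ → σ)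
    (h : ∀ s x, f s x = g s) :
    ∀ (l : List α) (s : σ), l.foldl f s = g^[l.length] s := by
  intro l
  induction l with
  | nil => intro s; rfl
  | cons x xs ih =>
      intro s
      simp [List.foldl, h, ih, Function.iterate_succ_apply]

def stepA (c : Int) (st : Int × Int × Int) : Int × Int × Int :=
  (c - (PySem.Int.floordiv st.2.1 10) * st.2.2, PySem.Int.floordiv st.2.1 10, st.2.2 * 10)

theorem floordiv_pow_ten (a : Int) (n : Nat) :
    PySem.Int.floordiv (a / 10 ^ n) 10 = a / 10 ^ (n + 1) := by
  rw [PySem.Int.floordiv_eq_ediv_of_pos (by norm_num),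
      Int.ediv_ediv_of_nonneg (by positivity), pow_succ]

theorem stepA_iterate (a : Int) :
    ∀ n : Nat, (stepA a)^[n] (0, a, 10) = (a % 10 ^ n, a / 10 ^ n, 10 ^ (n + 1)) := by
  intro n
  induction n with
  | zero => simp
  | succ n ih =>
      rw [Function.iterate_succ_apply', ih]
      have hmod : a - a / 10 ^ (n + 1) * 10 ^ (n + 1) = a % 10 ^ (n + 1) := by
        have := Int.emod_def a ((10:Int) ^ (n + 1)); linarith
      simp only [stepA, floordiv_pow_ten]
      exact Prod.ext hmod (Prod.ext rfl (by ring))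

-- low-digit peeling identity: a % 10 + (a/10 % 10^n) * 10 = a % 10^(n+1)
theorem emod_low_pow (a : Int) (n : Nat) :
    a % 10 + (a / 10 % 10 ^ n) * 10 = a % 10 ^ (n + 1) := by
  set v : Int := a % 10 + (a / 10 % 10 ^ n) * 10 with hv
  have h10 : a = 10 * (a / 10) + a % 10 := (Int.mul_ediv_add_emod a 10).symm
  have hq : a / 10 = 10 ^ n * (a / 10 / 10 ^ n) + a / 10 % 10 ^ n :=
    (Int.mul_ediv_add_emod (a / 10) ((10:Int) ^ n)).symm
  have hdecomp : a = v + 10 ^ (n + 1) * (a / 10 / 10 ^ n) := by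
    rw [hv, pow_succ]; linarith [h10, hq]
  have h0r : (0:Int) ≤ a % 10 := Int.emod_nonneg a (by norm_num)
  have h1r : a % 10 < 10 := Int.emod_lt_of_pos a (by norm_num)
  have h0q : (0:Int) ≤ a / 10 % 10 ^ n := Int.emod_nonneg _ (by positivity)
  have h1q : a / 10 % 10 ^ n < 10 ^ n := Int.emod_lt_of_pos _ (by positivity)
  have hvlt : v < 10 ^ (n + 1) := by rw [hv, pow_succ]; nlinarith
  have hvge : (0:Int) ≤ v := by rw [hv]; nlinarith
  calc v = v % 10 ^ (n + 1) := (Int.emod_eq_of_lt hvge hvlt).symm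
    _ = (v + 10 ^ (n + 1) * (a / 10 / 10 ^ n)) % 10 ^ (n + 1) := by
        rw [Int.add_mul_emod_self_left]
    _ = a % 10 ^ (n + 1) := by rw [← hdecomp]

theorem tailDigits_eq (n : Nat) : ∀ a : Int, tailDigits a n = a % 10 ^ n := by
  induction n with
  | zero => intro a; simp [tailDigits]
  | succ n ih =>
      intro a
      have hfd : PySem.Int.floordiv a 10 = a / 10 :=
        PySem.Int.floordiv_eq_ediv_of_pos (by norm_num)
      have hmd : PySem.Int.mod a 10 = a % 10 :=
        PySem.Int.mod_eq_emod_of_pos (by norm_num)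
      rw [tailDigits, ih, hfd, hmd, ← emod_low_pow a n]; ring

-- ===== VERDICT =====
theorem ultimosdigitos_spec : Claim_equal_ultimosdigitos := by
  intro a b _
  unfold Spec_ultimosdigitos ultimosdigitos ultimosdigitos_alt
  by_cases hg : gtPow10 a b
  · simp only [hg, if_true, not_true, if_false]
    have hA : List.foldl
        (fun (st : Int × Int × Int) (_ : Int) =>
          (a - PySem.Int.floordiv st.2.1 10 * st.2.2, PySem.Int.floordiv st.2.1 10, st.2.2 * 10))
        (0, a, 10) (PySem.List.pyRange 0 b 1)
        = (stepA a)^[(PySem.List.pyRange 0 b 1).length] (0, a, 10) :=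
      foldl_ignore _ (stepA a) (fun s _ => rfl) _ _
    have hlen : (PySem.List.pyRange 0 b 1).length = b.toNat := by
      rw [PySem.List.length_pyRange_one]; simp
    rw [hA, hlen, stepA_iterate, tailDigits_eq]
  · simp [hg]
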